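-- pv_equiv track=rewrite | github.com/nwa-catch-me-if-you-can-project/relfinder-api | helpers/sparql/endpoint.py | __extract_relationship_nodes
-- ===== SOURCE A (Python) =====
-- def __extract_relationship_nodes(src: str, dest: str, path_collections: list):
--     node_idx = 2
--     nodes = {
--         src: 0,
--         dest: 1
--     }
--
--     for collection in path_collections:
--         for path in collection["paths"]:
--             # Extract all object keys (ofx) from the path
--             obj_keys = [
--                 k for k in list(path.keys())
--                 if "of" in k or "middle" in k or "os" in k
--             ]
--
--             for k in obj_keys:
--                 # Add the node to the nodes dictionary if
--                 # it does not exist yet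
--                 entity = path[k]["value"]
--
--                 if entity not in nodes:
--                     nodes[entity] = node_idx
--                     node_idx += 1
--
--     return nodes
-- ===== SOURCE B (Python) =====
-- def __extract_relationship_nodes(src: str, dest: str, path_collections: list):
--     # Pass 1: gather every qualifying entity value, in traversal order.
--     entities = [
--         path[k]["value"]
--         for collection in path_collections
--         for path in collection["paths"]
--         for k in path
--         if "of" in k or "middle" in k or "os" in k
--     ]
--     # Pass 2: dedup (first occurrence wins), drop src/dest, index from 2.
--     nodes = {src: 0, dest: 1}
--     fresh = [e for e in dict.fromkeys(entities) if e not in nodes]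
--     nodes.update({e: i for i, e in enumerate(fresh, 2)})
--     return nodes
-- ===== Notes on version B (the rewrite author's own statement) =====
-- stated objective: alternative
-- what changed: A grows the dict and the running index inside a triply nested loop; B separates the phases: one flat comprehension gathers all qualifying entity values, dict.fromkeys dedups them in first-occurrence order, src/dest are filtered out against the pre-seeded dict, and a single enumerate(..., 2) assigns the indices in one dict.update.
import Mathlib
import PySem

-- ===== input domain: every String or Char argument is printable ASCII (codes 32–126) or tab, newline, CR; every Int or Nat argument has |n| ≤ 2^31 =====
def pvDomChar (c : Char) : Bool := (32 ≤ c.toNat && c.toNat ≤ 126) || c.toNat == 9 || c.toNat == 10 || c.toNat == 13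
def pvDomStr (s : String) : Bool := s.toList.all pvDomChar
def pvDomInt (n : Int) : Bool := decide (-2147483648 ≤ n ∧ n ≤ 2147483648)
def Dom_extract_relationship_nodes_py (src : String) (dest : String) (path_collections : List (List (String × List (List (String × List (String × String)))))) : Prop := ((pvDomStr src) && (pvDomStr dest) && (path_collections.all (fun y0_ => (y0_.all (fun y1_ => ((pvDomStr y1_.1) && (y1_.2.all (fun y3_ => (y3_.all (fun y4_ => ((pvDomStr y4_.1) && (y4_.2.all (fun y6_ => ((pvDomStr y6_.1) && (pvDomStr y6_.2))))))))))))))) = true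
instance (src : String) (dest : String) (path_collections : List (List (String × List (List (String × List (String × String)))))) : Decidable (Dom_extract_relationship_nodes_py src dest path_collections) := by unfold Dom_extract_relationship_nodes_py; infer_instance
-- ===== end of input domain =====

-- Port A grows the node dict and index inside a triply nested loop; B gathers a flat
-- list of qualifying entities, dedups in first-occurrence order, and indexes the fresh
-- ones with one enumerate-from-2 update (objective: alternative decomposition, same cost).


-- ===== PORT A =====
-- "of" in k or "middle" in k or "os" in k
def pvIsObjKey (k : String) : Bool :=
  PySem.Str.isIn "of" k || PySem.Str.isIn "middle" k || PySem.Str.isIn "os" k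

-- path[k]["value"]  (total form of the lookups; Pre_ guarantees the keys are present)
def pvEntity (pd : PySem.Dict String (List (String × String))) (k : String) : String :=
  (PySem.Dict.ofList (pd.getD k [])).getD "value" ""

def extract_relationship_nodes_py (src : String) (dest : String) (path_collections : List (List (String × List (List (String × List (String × String)))))) : List (String × Int) :=
  let st := path_collections.foldl
    (fun (st : PySem.Dict String Int × Int) collection =>
      ((PySem.Dict.ofList collection).getD "paths" []).foldl
        (fun st path =>
          let pd := PySem.Dict.ofList path
          let obj_keys := pd.keys.filter pvIsObjKey
          obj_keys.foldl
            (fun st k =>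
              let entity := pvEntity pd k
              if st.1.contains entity then st
              else (st.1.insert entity st.2, st.2 + 1)) st) st)
    ((PySem.Dict.empty.insert src 0).insert dest 1, 2)
  st.1.items

-- ===== PORT B =====
def extract_relationship_nodes_py_alt (src : String) (dest : String) (path_collections : List (List (String × List (List (String × List (String × String)))))) : List (String × Int) :=
  let entities := path_collections.flatMap (fun collection =>
    ((PySem.Dict.ofList collection).getD "paths" []).flatMap (fun path =>
      let pd := PySem.Dict.ofList path
      (pd.keys.filter pvIsObjKey).map (fun k => pvEntity pd k)))
  let nodes : PySem.Dict String Int := (PySem.Dict.empty.insert src 0).insert dest 1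
  let fresh := (PySem.List.dedup entities).filter (fun e => !nodes.contains e)
  (nodes.update ((PySem.List.enumerate fresh 2).map (fun p => (p.2, p.1)))).items

-- ===== PRECONDITION & SPEC =====
-- Pre_ excludes exactly the inputs where Python raises KeyError: a collection without a
-- "paths" key, or a qualifying path entry whose inner dict has no "value" key.
def Pre_extract_relationship_nodes_py (src : String) (dest : String) (path_collections : List (List (String × List (List (String × List (String × String)))))) : Prop :=
  ∀ collection ∈ path_collections,
    (PySem.Dict.ofList collection).contains "paths" = true ∧
    ∀ path ∈ (PySem.Dict.ofList collection).getD "paths" [],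
      ∀ k ∈ (PySem.Dict.ofList path).keys, pvIsObjKey k = true →
        (PySem.Dict.ofList ((PySem.Dict.ofList path).getD k [])).contains "value" = true
instance (src : String) (dest : String) (path_collections : List (List (String × List (List (String × List (String × String)))))) : Decidable (Pre_extract_relationship_nodes_py src dest path_collections) := by unfold Pre_extract_relationship_nodes_py; infer_instance

def pvWitness_extract_relationship_nodes_py : String × String × (List (List (String × List (List (String × List (String × String)))))) :=
  ("s", "d", [[("paths", [[("of1", [("value", "e")]), ("sub", [])]])]])

def Spec_extract_relationship_nodes_py (src : String) (dest : String) (path_collections : List (List (String × List (List (String × List (String × String)))))) (out : List (String × Int)) : Prop := out = extract_relationship_nodes_py_alt src dest path_collections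
instance (src : String) (dest : String) (path_collections : List (List (String × List (List (String × List (String × String)))))) (out : List (String × Int)) : Decidable (Spec_extract_relationship_nodes_py src dest path_collections out) := by unfold Spec_extract_relationship_nodes_py; infer_instance

-- ===== CLAIM (what is proved, stated in full; the proofs are below) =====
def Claim_equal_extract_relationship_nodes_py : Prop := ∀ (src : String) (dest : String) (path_collections : List (List (String × List (List (String × List (String × String)))))), Dom_extract_relationship_nodes_py src dest path_collections → Pre_extract_relationship_nodes_py src dest path_collections → Spec_extract_relationship_nodes_py src dest path_collections (extract_relationship_nodes_py src dest path_collections)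

-- ===== LEMMAS AND PROOFS =====
-- A's loop body: add entity e with the next index if it is not a key yet.
def pvStep (st : PySem.Dict String Int × Int) (e : String) : PySem.Dict String Int × Int :=
  if st.1.contains e then st else (st.1.insert e st.2, st.2 + 1)

theorem pv_dedup_cons (e : String) (es : List String) :
    PySem.List.dedup (e :: es)
      = e :: (PySem.List.dedup es).filter (fun y => !(y == e)) := by
  simp only [PySem.List.dedup_eq_ofList]
  rw [show PySem.Set.ofList (e :: es) = PySem.Set.update (PySem.Set.add PySem.Set.empty e) es from rfl]
  rw [PySem.Set.update_eq_append_filter]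
  simp only [PySem.Set.add, PySem.Set.empty, PySem.Set.contains, List.contains_nil,
    if_neg Bool.false_ne_true, List.cons_append, List.nil_append, List.cons.injEq, true_and]
  apply List.filter_congr
  intro y _
  by_cases h : y = e
  · subst h; simp
  · simp [h]

theorem pv_loop_eq (es : List String) (d : PySem.Dict String Int) (n : Int) :
    es.foldl pvStep (d, n)
      = (d.update ((PySem.List.enumerate
            ((PySem.List.dedup es).filter (fun e => !d.contains e)) n).map (fun p => (p.2, p.1))),
         n + ((PySem.List.dedup es).filter (fun e => !d.contains e)).length) := by
  induction es generalizing d n with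
  | nil => simp [PySem.List.dedup]; rfl
  | cons e es ih =>
    rw [List.foldl_cons, pv_dedup_cons, List.filter_cons]
    by_cases h : d.contains e = true
    · have hstep : pvStep (d, n) e = (d, n) := by simp [pvStep, h]
      have hf : ((PySem.List.dedup es).filter (fun y => !(y == e))).filter (fun x => !d.contains x)
          = (PySem.List.dedup es).filter (fun x => !d.contains x) := by
        rw [List.filter_filter]
        apply List.filter_congr
        intro y _
        by_cases hy : y = e
        · subst hy; simp [h]
        · simp [hy, Bool.and_comm]
      rw [hstep, ih, show (!d.contains e) = false by simp [h], if_neg Bool.false_ne_true, hf]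
    · have h' : d.contains e = false := by simpa using h
      have hstep : pvStep (d, n) e = (d.insert e n, n + 1) := by simp [pvStep, h']
      have hf : (PySem.List.dedup es).filter (fun x => !(d.insert e n).contains x)
          = ((PySem.List.dedup es).filter (fun y => !(y == e))).filter (fun x => !d.contains x) := by
        rw [List.filter_filter]
        apply List.filter_congr
        intro y _
        rw [PySem.Dict.contains_insert]
        by_cases hy : y = e
        · subst hy; simp
        · simp [Bool.and_comm]
      rw [hstep, ih, hf, show (!d.contains e) = true by simp [h'], if_pos rfl,
        PySem.List.enumerate_cons, List.map_cons, List.length_cons]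
      show ((d.insert e n).update _, _) = ((d.insert e n).update _, _)
      simp only [Prod.mk.injEq]
      exact ⟨trivial, by push_cast; ring⟩

lemma pv_foldl_flatMap {α β γ : Type} (l : List α) (f : α → List β) (g : γ → β → γ) (init : γ) :
    (l.flatMap f).foldl g init = l.foldl (fun acc a => (f a).foldl g acc) init := by
  induction l generalizing init with
  | nil => rfl
  | cons a t ih => simp [List.flatMap_cons, List.foldl_append, ih]

-- A's triply nested loop is the flat entity list folded through pvStep.
lemma pv_A_flat (pcs : List (List (String × List (List (String × List (String × String))))))
    (init : PySem.Dict String Int × Int) :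
    pcs.foldl
      (fun (st : PySem.Dict String Int × Int) collection =>
        ((PySem.Dict.ofList collection).getD "paths" []).foldl
          (fun st path =>
            let pd := PySem.Dict.ofList path
            let obj_keys := pd.keys.filter pvIsObjKey
            obj_keys.foldl
              (fun st k =>
                let entity := pvEntity pd k
                if st.1.contains entity then st
                else (st.1.insert entity st.2, st.2 + 1)) st) st) init
    = (pcs.flatMap (fun collection =>
        ((PySem.Dict.ofList collection).getD "paths" []).flatMap (fun path =>
          let pd := PySem.Dict.ofList path
          (pd.keys.filter pvIsObjKey).map (fun k => pvEntity pd k)))).foldl pvStep init := by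
  rw [pv_foldl_flatMap]
  apply PySem.List.foldl_congr_mem
  intro st c _
  rw [pv_foldl_flatMap]
  apply PySem.List.foldl_congr_mem
  intro st p _
  rw [List.foldl_map]
  rfl

-- ===== VERDICT (by name: the statement is the Claim_ definition above) =====
theorem extract_relationship_nodes_py_spec : Claim_equal_extract_relationship_nodes_py := by
  intro src dest pcs _ _
  unfold Spec_extract_relationship_nodes_py
  simp only [extract_relationship_nodes_py, extract_relationship_nodes_py_alt]
  rw [pv_A_flat, pv_loop_eq]
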